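-- pv_equiv track=rewrite | github.com/jorgenengelsen/AoC22 | day6/main.py | find_packet_start
-- ===== SOURCE A (Python) =====
-- class RollingWindow:
--     def __init__(self, length: int) -> None:
--         self.array = []
--         self.length = length
--
--     def push(self, item):
--         self.array.append(item)
--         if len(self.array) > self.length:
--             self.pop()
--
--     def pop(self):
--         self.array = self.array[1:]
--
--     def check_for_repetition(self):
--         return len(self.array) == len(set(self.array))
--
-- def find_packet_start(message: str, window_length: int):
--     cache = RollingWindow(window_length)
--
--     for i in range(window_length):
--         cache.push(message[i])
--
--     for i, char in enumerate(message[window_length:]):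
--
--         if not char in cache.array:
--             if cache.check_for_repetition():
--                 return i+window_length+1
--
--         cache.push(char)
-- ===== SOURCE B (Python) =====
-- def find_packet_start(message: str, window_length: int):
--     # O(n) sliding window: `last` maps each char to its most recent index, `start` is
--     # the left edge of the current all-distinct window.  A's answer is the end position
--     # of the first all-distinct window of w = window_length + 1 characters, i.e. start + w.
--     w = window_length + 1
--     last = {}
--     start = 0
--     for i, ch in enumerate(message):
--         if ch in last and last[ch] >= start:
--             start = last[ch] + 1
--         last[ch] = i
--         if i - start + 1 >= w:
--             return start + w
--     return None
-- ===== Notes on version B (the rewrite author's own statement) =====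
-- stated objective: faster
-- what changed: Replaced the rolling-buffer scan that rebuilds a set and does a list membership test for every position with the classic one-pass sliding window keeping each character's last-seen index in a dict and moving the window's left edge in O(1) per character.
-- crash fix: When window_length > len(message) A raises IndexError while indexing message[i] in its warm-up loop; B returns None since no window of window_length+1 distinct characters can exist. — e.g. on find_packet_start("", 1): A raises IndexError, B returns none
import Mathlib
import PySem

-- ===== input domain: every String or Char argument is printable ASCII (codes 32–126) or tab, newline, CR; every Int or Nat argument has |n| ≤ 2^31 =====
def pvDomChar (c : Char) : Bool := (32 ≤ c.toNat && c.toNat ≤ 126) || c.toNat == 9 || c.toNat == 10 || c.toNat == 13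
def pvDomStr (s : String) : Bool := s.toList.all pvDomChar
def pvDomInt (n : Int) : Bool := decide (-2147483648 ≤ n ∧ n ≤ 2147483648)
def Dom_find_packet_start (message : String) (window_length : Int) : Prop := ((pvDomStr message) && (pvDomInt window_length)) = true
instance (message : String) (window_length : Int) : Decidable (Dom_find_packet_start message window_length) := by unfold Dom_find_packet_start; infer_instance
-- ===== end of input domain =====

-- B replaces A's rolling buffer (list membership test + a fresh set per position, O(n*w))
-- by the classic one-pass sliding window with a last-seen-index dict, O(1) per character.

-- ===== PORT A =====
-- RollingWindow.push (pop is inlined: self.array = self.array[1:])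
def pushA (length : Int) (arr : List Char) (item : Char) : List Char :=
  let a := arr ++ [item]
  if (a.length : Int) > length then PySem.List.slice a (some 1) none else a

-- RollingWindow.check_for_repetition: len(self.array) == len(set(self.array))
def checkRepA (arr : List Char) : Bool := arr.length == (PySem.Set.ofList arr).length

-- the 'for i, char in enumerate(message[window_length:])' loop
def loopA (length : Int) : List (Int × Char) → List Char → Option Int
  | [], _ => none
  | (i, c) :: rest, arr =>
    if !(arr.contains c) then
      if checkRepA arr then some (i + length + 1)
      else loopA length rest (pushA length arr c)
    else loopA length rest (pushA length arr c)

def find_packet_start (message : String) (window_length : Int) : Option Int :=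
  let l := message.toList
  -- for i in range(window_length): cache.push(message[i])   (pyGetD: in range under Pre_)
  let cache := (PySem.List.pyRange 0 window_length 1).foldl
      (fun arr i => pushA window_length arr (PySem.List.pyGetD l i ' ')) []
  loopA window_length (PySem.List.enumerate (PySem.List.slice l (some window_length) none) 0) cache

-- ===== PORT B =====
-- the 'for i, ch in enumerate(message)' loop of Source B; state = (last, start)
def loopB (w : Int) : List (Int × Char) → PySem.Dict Char Int → Int → Option Int
  | [], _, _ => none
  | (i, ch) :: rest, last, start =>
    let start' := match last.get? ch with
      | some j => if j ≥ start then j + 1 else start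
      | none => start
    let last' := last.insert ch i
    if i - start' + 1 ≥ w then some (start' + w) else loopB w rest last' start'

def find_packet_start_alt (message : String) (window_length : Int) : Option Int :=
  let w := window_length + 1
  loopB w (PySem.List.enumerate message.toList 0) PySem.Dict.empty 0

-- ===== PRECONDITION & SPEC =====
-- Pre_ excludes exactly the inputs where A raises: window_length > len(message),
-- an IndexError in A's warm-up loop.
def Pre_find_packet_start (message : String) (window_length : Int) : Prop :=
  window_length ≤ PySem.Str.len message
instance (message : String) (window_length : Int) : Decidable (Pre_find_packet_start message window_length) := by unfold Pre_find_packet_start; infer_instance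

def pvWitness_find_packet_start : String × Int := ("mjqjpqmgbljsphdztnvjfqwrcgsmlb", 3)

-- When window_length > len(message), A raises IndexError while B returns None
-- (no window of window_length+1 distinct characters can exist).
def Raises_find_packet_start (message : String) (window_length : Int) : Prop :=
  PySem.Str.len message < window_length
instance (message : String) (window_length : Int) : Decidable (Raises_find_packet_start message window_length) := by unfold Raises_find_packet_start; infer_instance
def pvRaiseWitness_find_packet_start : String × Int := ("", 1)
def pvRaiseWitnessOut_find_packet_start : Option Int := none

def Spec_find_packet_start (message : String) (window_length : Int) (out : Option Int) : Prop := out = find_packet_start_alt message window_length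
instance (message : String) (window_length : Int) (out : Option Int) : Decidable (Spec_find_packet_start message window_length out) := by unfold Spec_find_packet_start; infer_instance

-- ===== CLAIM (what is proved, stated in full; the proofs are below) =====
def Claim_equal_find_packet_start : Prop := ∀ (message : String) (window_length : Int), Dom_find_packet_start message window_length → Pre_find_packet_start message window_length → Spec_find_packet_start message window_length (find_packet_start message window_length)

def Claim_raises_find_packet_start : Prop := (∀ (message : String) (window_length : Int), Dom_find_packet_start message window_length → Raises_find_packet_start message window_length → ¬ Pre_find_packet_start message window_length) ∧ (Dom_find_packet_start (pvRaiseWitness_find_packet_start.1) (pvRaiseWitness_find_packet_start.2) ∧ Raises_find_packet_start (pvRaiseWitness_find_packet_start.1) (pvRaiseWitness_find_packet_start.2) ∧ find_packet_start_alt (pvRaiseWitness_find_packet_start.1) (pvRaiseWitness_find_packet_start.2) = pvRaiseWitnessOut_find_packet_start)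

-- ===== LEMMAS AND PROOFS =====

-- window notation: pvWin l a m = l[a : a+m]
def pvWin (l : List Char) (a m : Nat) : List Char := (l.drop a).take m

lemma pvWin_succ (l : List Char) (a m : Nat) (h : a + m < l.length) :
    pvWin l a (m+1) = pvWin l a m ++ [l[a+m]] := by
  unfold pvWin
  rw [List.take_add_one]
  congr 1
  simp [List.getElem?_drop, List.getElem?_eq_getElem (by omega : a + m < l.length)]

lemma pvWin_mem_iff (l : List Char) (a m : Nat) (c : Char) :
    c ∈ pvWin l a m ↔ ∃ t, a ≤ t ∧ t < a + m ∧ l[t]? = some c := by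
  unfold pvWin
  rw [List.mem_iff_getElem]
  constructor
  · rintro ⟨k, hk, hek⟩
    have hk' : k < m ∧ a + k < l.length := by
      simp [List.length_take, List.length_drop] at hk; omega
    refine ⟨a + k, by omega, by omega, ?_⟩
    rw [List.getElem?_eq_getElem (by omega)]
    rw [List.getElem_take, List.getElem_drop] at hek
    simp [hek]
  · rintro ⟨t, hat, htm, het⟩
    have htn : t < l.length := by
      by_contra hc
      rw [List.getElem?_eq_none (by omega)] at het; simp at het
    refine ⟨t - a, ?_, ?_⟩
    · simp [List.length_take, List.length_drop]; omega
    · rw [List.getElem?_eq_getElem htn] at het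
      have het' := Option.some.inj het
      rw [List.getElem_take, List.getElem_drop]
      simp only [show a + (t - a) = t by omega]
      exact het'

lemma pvWin_nodup_sub {l : List Char} {a m b m' : Nat} (h : (pvWin l a m).Nodup)
    (hab : a ≤ b) (hm : b + m' ≤ a + m) : (pvWin l b m').Nodup := by
  have : pvWin l b m' = (((pvWin l a m).drop (b - a)).take m') := by
    unfold pvWin
    rw [List.drop_take, List.drop_drop, List.take_take]
    congr 2
    · omega
    · omega
  rw [this]
  exact (List.take_sublist _ _ |>.trans (List.drop_sublist _ _)).nodup h

lemma pvWin_nodup_ne {l : List Char} {a m x y : Nat} (h : (pvWin l a m).Nodup)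
    (hx : a ≤ x) (hxy : x < y) (hy : y < a + m) (hyn : y < l.length) :
    l[x]? ≠ l[y]? := by
  intro he
  have hxn : x < l.length := by omega
  have hlen : (pvWin l a m).length = min m (l.length - a) := by
    unfold pvWin; simp [List.length_take, List.length_drop]
  have hxk : x - a < (pvWin l a m).length := by omega
  have hyk : y - a < (pvWin l a m).length := by omega
  have hgx : (pvWin l a m)[x - a] = l[x] := by
    unfold pvWin; rw [List.getElem_take, List.getElem_drop]; congr 1; omega
  have hgy : (pvWin l a m)[y - a] = l[y] := by
    unfold pvWin; rw [List.getElem_take, List.getElem_drop]; congr 1; omega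
  have : x - a = y - a := by
    apply (List.Nodup.getElem_inj_iff h).mp
    rw [hgx, hgy]
    rw [List.getElem?_eq_getElem hxn, List.getElem?_eq_getElem hyn] at he
    exact Option.some.inj he
  omega

-- check_for_repetition is exactly Nodup
lemma pvOfList_sublist (xs : List Char) : (PySem.Set.ofList xs).Sublist xs := by
  induction xs using List.reverseRecOn with
  | nil => simp [PySem.Set.ofList]
  | append_singleton ys y ih =>
    have : PySem.Set.ofList (ys ++ [y]) = PySem.Set.add (PySem.Set.ofList ys) y := by
      rw [PySem.Set.ofList_eq_foldl, PySem.Set.ofList_eq_foldl, List.foldl_append]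
      rfl
    rw [this]
    unfold PySem.Set.add
    split
    · exact ih.trans (List.sublist_append_left ys [y])
    · exact ih.append_right [y]

lemma pvCheckRep_iff (arr : List Char) : checkRepA arr = true ↔ arr.Nodup := by
  unfold checkRepA
  rw [beq_iff_eq]
  constructor
  · intro h
    have := List.Sublist.eq_of_length (pvOfList_sublist arr) h.symm
    rw [← this]
    exact PySem.Set.nodup_ofList arr
  · intro h
    rw [PySem.Set.ofList_eq_self_of_nodup arr h]

-- the warm-up loop builds l.take wlN
lemma pvCacheA (l : List Char) (wlN : Nat) (hw : wlN ≤ l.length) :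
    ∀ k, k ≤ wlN →
      (PySem.List.pyRange 0 (k:Int) 1).foldl
        (fun arr i => pushA (wlN:Int) arr (PySem.List.pyGetD l i ' ')) [] = l.take k := by
  intro k
  induction k with
  | zero => intro _; simp [PySem.List.pyRange_one_eq_nil]
  | succ k ih =>
    intro hk
    have h1 : ((k+1:Nat):Int) = (k:Int) + 1 := by push_cast; ring
    rw [h1, PySem.List.pyRange_one_succ_right (by positivity), List.foldl_append,
        ih (by omega)]
    simp only [List.foldl_cons, List.foldl_nil]
    have hkn : k < l.length := by omega
    have hg : PySem.List.pyGetD l (k:Int) ' ' = l[k] := by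
      simp [PySem.List.pyGetD_natCast, List.getD_eq_getElem?_getD,
            List.getElem?_eq_getElem hkn]
    rw [hg]
    unfold pushA
    have hlen : (l.take k ++ [l[k]]).length = k + 1 := by
      simp [List.length_take]; omega
    rw [if_neg (by rw [hlen]; push_cast; omega)]
    have := pvWin_succ l 0 k (by omega)
    simp only [pvWin, List.drop_zero, Nat.zero_add] at this
    exact this.symm

-- one push in the main loop slides the full window
lemma pvPushFull (l : List Char) (wlN j : Nat) (h : j + wlN < l.length) :
    pushA (wlN:Int) (pvWin l j wlN) (l[j + wlN]) = pvWin l (j+1) wlN := by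
  unfold pushA
  have happ : pvWin l j wlN ++ [l[j + wlN]] = pvWin l j (wlN+1) := (pvWin_succ l j wlN h).symm
  rw [happ]
  have hlen : (pvWin l j (wlN+1)).length = wlN + 1 := by
    unfold pvWin; simp [List.length_take, List.length_drop]; omega
  rw [if_pos (by rw [hlen]; push_cast; omega)]
  rw [PySem.List.slice_from_one]
  unfold pvWin
  rw [← List.drop_one, List.drop_take, List.drop_drop]
  congr 2

-- the main loop of A, characterised as a first-match search over window starts
lemma pvLoopA (l : List Char) (wlN : Nat) :
    ∀ (k jN : Nat), jN + k + wlN = l.length →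
      loopA (wlN:Int) (PySem.List.enumerate (l.drop (jN + wlN)) (jN:Int)) (pvWin l jN wlN)
        = ((List.range' jN k).find? (fun j => decide (pvWin l j (wlN+1)).Nodup)).map
            (fun j => (j:Int) + wlN + 1) := by
  intro k
  induction k with
  | zero =>
    intro jN hn
    rw [List.drop_of_length_le (by omega)]
    simp [PySem.List.enumerate, loopA]
  | succ k ih =>
    intro jN hn
    have hjw : jN + wlN < l.length := by omega
    rw [List.drop_eq_getElem_cons hjw, PySem.List.enumerate_cons]
    have harr : pvWin l jN (wlN+1) = pvWin l jN wlN ++ [l[jN + wlN]] := pvWin_succ l jN wlN hjw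
    have hni : (pvWin l jN (wlN+1)).Nodup ↔ (pvWin l jN wlN).Nodup ∧ l[jN + wlN] ∉ pvWin l jN wlN := by
      rw [harr]
      simp only [List.nodup_append, List.nodup_cons, List.not_mem_nil, not_false_iff,
                 List.nodup_nil, and_true, true_and]
      constructor
      · rintro ⟨h1, h2⟩
        exact ⟨h1, fun hc => h2 _ hc _ (List.mem_singleton_self _) rfl⟩
      · rintro ⟨h1, h2⟩
        refine ⟨h1, fun a ha b hb he => ?_⟩
        rw [List.mem_singleton] at hb
        subst hb; subst he
        exact h2 ha
    have hcond : ((pvWin l jN wlN).contains (l[jN + wlN]) = false ∧ checkRepA (pvWin l jN wlN) = true)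
        ↔ (pvWin l jN (wlN+1)).Nodup := by
      rw [hni, pvCheckRep_iff]
      constructor
      · rintro ⟨h1, h2⟩
        exact ⟨h2, by simpa using h1⟩
      · rintro ⟨h1, h2⟩
        exact ⟨by simpa using h2, h1⟩
    rw [List.range'_succ]
    by_cases hP : (pvWin l jN (wlN+1)).Nodup
    · rw [List.find?_cons_of_pos (by simpa using hP)]
      have hc : (pvWin l jN wlN).contains (l[jN + wlN]) = false := (hcond.mpr hP).1
      simp only [loopA, hc, Bool.not_false, if_true, (hcond.mpr hP).2]
      simp
    · rw [List.find?_cons_of_neg (by simpa using hP)]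
      have hrec : loopA (wlN:Int) (PySem.List.enumerate (l.drop (jN + wlN + 1)) ((jN:Int)+1))
          (pushA (wlN:Int) (pvWin l jN wlN) (l[jN + wlN]))
          = ((List.range' (jN+1) k).find? (fun j => decide (pvWin l j (wlN+1)).Nodup)).map
              (fun j => (j:Int) + wlN + 1) := by
        rw [pvPushFull l wlN jN hjw]
        have := ih (jN+1) (by omega)
        have hcast : ((jN+1:Nat):Int) = (jN:Int) + 1 := by push_cast; ring
        rw [hcast] at this
        have hidx : jN + 1 + wlN = jN + wlN + 1 := by omega
        rw [hidx] at this
        exact this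
      by_cases hc : (pvWin l jN wlN).contains (l[jN + wlN])
      · simp only [loopA, hc, Bool.not_true, Bool.false_eq_true, if_false]
        exact hrec
      · have hc' : (pvWin l jN wlN).contains (l[jN + wlN]) = false := by
          simpa using hc
        have hr : checkRepA (pvWin l jN wlN) = false := by
          rw [Bool.eq_false_iff]
          intro hrep
          exact hP (hcond.mp ⟨hc', hrep⟩)
        simp only [loopA, hc', hr, Bool.not_false, if_true, Bool.false_eq_true, if_false]
        exact hrec
lemma pvWin_snoc (l : List Char) (a e : Nat) (h1 : a ≤ e) (h2 : e < l.length) :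
    pvWin l a (e + 1 - a) = pvWin l a (e - a) ++ [l[e]] := by
  unfold pvWin
  rw [show e + 1 - a = (e - a) + 1 by omega, List.take_add_one, List.getElem?_drop,
      show a + (e - a) = e by omega, List.getElem?_eq_getElem h2]
  rfl

-- invariant for B's dict: get? c is the last index of c in l[:iN] (none if absent)
def pvLastInv (l : List Char) (iN : Nat) (d : PySem.Dict Char Int) : Prop :=
  ∀ c : Char,
    (∀ j, d.get? c = some j →
       ∃ jN : Nat, j = (jN:Int) ∧ jN < iN ∧ l[jN]? = some c ∧
         ∀ t, jN < t → t < iN → l[t]? ≠ some c) ∧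
    (d.get? c = none → ∀ t, t < iN → l[t]? ≠ some c)

-- the main loop of B, characterised as a first-match search over window ends
lemma pvLoopB (l : List Char) (wlN : Nat) :
    ∀ (k iN sN : Nat) (d : PySem.Dict Char Int), iN + k = l.length →
      sN ≤ iN → iN - sN ≤ wlN →
      (pvWin l sN (iN - sN)).Nodup →
      (sN = 0 ∨ ∃ t, sN ≤ t ∧ t < iN ∧ l[t]? = l[sN - 1]?) →
      pvLastInv l iN d →
      loopB ((wlN:Int)+1) (PySem.List.enumerate (l.drop iN) (iN:Int)) d (sN:Int)
        = ((List.range' iN k).find?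
            (fun e => decide (wlN ≤ e ∧ (pvWin l (e - wlN) (wlN+1)).Nodup))).map
            (fun e => (e:Int) + 1) := by
  intro k
  induction k with
  | zero =>
    intro iN sN d hn _ _ _ _ _
    rw [List.drop_of_length_le (by omega)]
    simp [PySem.List.enumerate, loopB]
  | succ k ih =>
    intro iN sN d hn hsi hwl hnd hmin hinv
    have hin : iN < l.length := by omega
    rw [List.drop_eq_getElem_cons hin, PySem.List.enumerate_cons]
    set c := l[iN] with hc
    -- the new left edge s'N and its invariants
    obtain ⟨s'N, hstart, hs'ge, hs'le, hnd', hmin'⟩ :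
        ∃ s'N : Nat,
          (match d.get? c with
            | some j => if j ≥ (sN:Int) then j + 1 else (sN:Int)
            | none => (sN:Int)) = (s'N : Int) ∧
          sN ≤ s'N ∧
          s'N ≤ iN ∧
          (pvWin l s'N (iN + 1 - s'N)).Nodup ∧
          (s'N = 0 ∨ ∃ t, s'N ≤ t ∧ t < iN + 1 ∧ l[t]? = l[s'N - 1]?) := by
      have hnotin : ∀ (h : ∀ t, sN ≤ t → t < iN → l[t]? ≠ some c),
          (pvWin l sN (iN + 1 - sN)).Nodup := by
        intro h
        rw [pvWin_snoc l sN iN (by omega) hin]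
        simp only [List.nodup_append, List.nodup_cons, List.not_mem_nil, not_false_iff,
                   List.nodup_nil, and_true, true_and]
        refine ⟨hnd, fun a ha b hb he => ?_⟩
        rw [List.mem_singleton] at hb
        subst hb; subst he
        rw [pvWin_mem_iff] at ha
        obtain ⟨t, h1, h2, h3⟩ := ha
        exact h t h1 (by omega) h3
      cases hd : d.get? c with
      | none =>
        refine ⟨sN, by simp, le_rfl, by omega, ?_, ?_⟩
        · exact hnotin (fun t _ ht2 => ((hinv c).2 hd) t ht2)
        · rcases hmin with h0 | ⟨t, h1, h2, h3⟩
          · exact Or.inl h0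
          · exact Or.inr ⟨t, h1, by omega, h3⟩
      | some j =>
        obtain ⟨jN, hj, hjlt, hjc, hjlast⟩ := (hinv c).1 j hd
        by_cases hge : j ≥ (sN:Int)
        · have hsj : sN ≤ jN := by omega
          refine ⟨jN + 1, ?_, by omega, by omega, ?_, ?_⟩
          · show (if j ≥ (sN:Int) then j + 1 else (sN:Int)) = ((jN+1:Nat):Int)
            rw [if_pos hge, hj]; push_cast; ring
          · rw [pvWin_snoc l (jN+1) iN (by omega) hin]
            simp only [List.nodup_append, List.nodup_cons, List.not_mem_nil, not_false_iff,
                       List.nodup_nil, and_true, true_and]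
            constructor
            · exact pvWin_nodup_sub hnd (by omega) (by omega)
            · intro a ha b hb he
              rw [List.mem_singleton] at hb
              subst hb; subst he
              rw [pvWin_mem_iff] at ha
              obtain ⟨t, h1, h2, h3⟩ := ha
              exact hjlast t (by omega) (by omega) h3
          · refine Or.inr ⟨iN, by omega, by omega, ?_⟩
            simp only [Nat.add_sub_cancel]
            rw [List.getElem?_eq_getElem hin, hjc]
        · have hjs : jN < sN := by omega
          refine ⟨sN, by show (if j ≥ (sN:Int) then j + 1 else (sN:Int)) = (sN:Int); rw [if_neg hge], le_rfl, by omega, ?_, ?_⟩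
          · refine hnotin (fun t ht1 ht2 => hjlast t (by omega) ht2)
          · rcases hmin with h0 | ⟨t, h1, h2, h3⟩
            · exact Or.inl h0
            · exact Or.inr ⟨t, h1, by omega, h3⟩
    -- minimality: a distinct window of size wlN+1 ending at iN forces the branch to fire
    have hminimal : (wlN ≤ iN ∧ (pvWin l (iN - wlN) (wlN+1)).Nodup) → s'N + wlN ≤ iN := by
      rintro ⟨hwi, hq⟩
      by_contra hgt
      rcases hmin' with h0 | ⟨t, h1, h2, h3⟩
      · omega
      · have hne := pvWin_nodup_ne hq (a := iN - wlN) (m := wlN+1)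
          (x := s'N - 1) (y := t) (by omega) (by omega) (by omega) (by omega)
        exact hne h3.symm
    -- the branch condition is exactly s'N + wlN ≤ iN
    simp only [loopB, hstart]
    rw [List.range'_succ]
    by_cases hbr : s'N + wlN ≤ iN
    · rw [if_pos (by omega)]
      have hq : wlN ≤ iN ∧ (pvWin l (iN - wlN) (wlN+1)).Nodup := by
        refine ⟨by omega, ?_⟩
        exact pvWin_nodup_sub hnd' (by omega) (by omega)
      rw [List.find?_cons_of_pos (by simpa using hq)]
      -- the window length grows by at most one per step, so the first hit is exact:
      -- s'N + wlN = iN, hence start + w = iN + 1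
      have hex : s'N + wlN = iN := by
        clear! hstart hnd' hmin' hminimal hinv hnd hmin ih hq
        omega
      rw [show ((s'N:Int) + ((wlN:Int)+1)) = ((iN:Int)+1) by omega]
      simp

    · rw [if_neg (by omega)]
      have hnq : ¬ (wlN ≤ iN ∧ (pvWin l (iN - wlN) (wlN+1)).Nodup) := fun h => hbr (hminimal h)
      rw [List.find?_cons_of_neg (by simpa using hnq)]
      have hrec := ih (iN+1) s'N (d.insert c (iN:Int)) (by omega) (by omega) (by omega) hnd' hmin' ?_
      · have hcast : ((iN+1:Nat):Int) = (iN:Int) + 1 := by push_cast; ring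
        rw [hcast] at hrec
        exact hrec
      · intro c'
        constructor
        · intro j hj
          by_cases hcc : c' = c
          · subst hcc
            rw [PySem.Dict.get?_insert, if_pos rfl] at hj
            refine ⟨iN, (Option.some.inj hj).symm, by omega, ?_, fun t ht1 ht2 => by omega⟩
            rw [List.getElem?_eq_getElem hin]
          · rw [PySem.Dict.get?_insert, if_neg hcc] at hj
            obtain ⟨jN, h1, h2, h3, h4⟩ := (hinv c').1 j hj
            refine ⟨jN, h1, by omega, h3, fun t ht1 ht2 => ?_⟩
            by_cases ht : t = iN
            · subst ht
              rw [List.getElem?_eq_getElem hin]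
              intro he
              exact hcc (Option.some.inj he).symm
            · exact h4 t ht1 (by omega)
        · intro hj
          by_cases hcc : c' = c
          · subst hcc
            rw [PySem.Dict.get?_insert, if_pos rfl] at hj
            simp at hj
          · rw [PySem.Dict.get?_insert, if_neg hcc] at hj
            intro t ht
            by_cases ht' : t = iN
            · subst ht'
              rw [List.getElem?_eq_getElem hin]
              intro he
              exact hcc (Option.some.inj he).symm
            · exact (hinv c').2 hj t (by omega)
-- index shift: the end-based search (B) is the start-based search (A) shifted by wlN
lemma pvBridge (l : List Char) (wlN : Nat) (hw : wlN ≤ l.length) :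
    ((List.range' 0 l.length).find?
        (fun e => decide (wlN ≤ e ∧ (pvWin l (e - wlN) (wlN+1)).Nodup))).map (fun e => (e:Int) + 1)
    = ((List.range' 0 (l.length - wlN)).find?
        (fun j => decide (pvWin l j (wlN+1)).Nodup)).map (fun j => (j:Int) + wlN + 1) := by
  have hsplit : List.range' 0 l.length
      = List.range' 0 wlN ++ List.range' wlN (l.length - wlN) := by
    have := List.range'_append (s := 0) (m := wlN) (n := l.length - wlN) (step := 1)
    simp only [Nat.zero_add, Nat.one_mul] at this
    rw [this, show wlN + (l.length - wlN) = l.length by omega]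
  rw [hsplit, List.find?_append]
  have h1 : (List.range' 0 wlN).find?
      (fun e => decide (wlN ≤ e ∧ (pvWin l (e - wlN) (wlN+1)).Nodup)) = none := by
    rw [List.find?_eq_none]
    intro x hx
    rw [List.mem_range'_1] at hx
    simp only [decide_eq_true_eq, not_and]
    intro hc
    omega
  rw [h1, Option.none_or]
  rw [List.range'_eq_map_range, List.find?_map, ← List.range_eq_range']
  have hpred : ((fun e => decide (wlN ≤ e ∧ (pvWin l (e - wlN) (wlN+1)).Nodup)) ∘ (fun x => wlN + x))
      = (fun j => decide (pvWin l j (wlN+1)).Nodup) := by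
    funext j
    simp
  rw [hpred]
  cases hF : List.find? (fun j => decide (pvWin l j (wlN + 1)).Nodup) (List.range (l.length - wlN)) with
  | none => simp
  | some j =>
    simp
    ring
-- ===== VERDICT (by name: the statement is the Claim_ definition above) =====
-- degenerate negative window: both sides return window_length + 1 on a nonempty
-- message (A from its first tail character, B because the size bound is already met)
lemma pvNegCase (message : String) (wl : Int) (hneg : wl < 0) :
    find_packet_start message wl = find_packet_start_alt message wl := by
  obtain ⟨kN, hk, rfl⟩ : ∃ kN : Nat, 0 < kN ∧ wl = -(kN:Int) :=
    ⟨(-wl).toNat, by omega, by omega⟩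
  unfold find_packet_start find_packet_start_alt
  rw [PySem.List.pyRange_one_eq_nil (by omega)]
  simp only [List.foldl_nil]
  rw [PySem.List.slice_some_none, PySem.List.clampIdx_neg_natCast _ _ hk]
  cases hl : message.toList with
  | nil => simp [loopA, loopB, PySem.List.enumerate]
  | cons c rest =>
    have hlen : 0 < (c :: rest).length := by simp
    cases hdrop : (c :: rest).drop ((c :: rest).length - kN) with
    | nil =>
      exfalso
      rw [List.drop_eq_nil_iff] at hdrop
      omega
    | cons d tl =>
      rw [PySem.List.enumerate_cons, PySem.List.enumerate_cons]
      simp only [loopA, loopB, PySem.Dict.get?_empty, checkRepA, List.contains_nil,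
                 Bool.not_false, if_true]
      rw [if_pos (by decide), if_pos (by omega)]
      norm_num

theorem find_packet_start_spec : Claim_equal_find_packet_start := by
  unfold Claim_equal_find_packet_start
  intro message wl hDom hPre
  unfold Spec_find_packet_start
  unfold Pre_find_packet_start at hPre
  by_cases hneg : wl < 0
  · exact pvNegCase message wl hneg
  · have h0 : 0 ≤ wl := by omega
    have hle : wl ≤ PySem.Str.len message := hPre
    obtain ⟨wlN, rfl⟩ : ∃ wlN : Nat, wl = (wlN : Int) := ⟨wl.toNat, (Int.toNat_of_nonneg h0).symm⟩
    have hwn : wlN ≤ message.toList.length := by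
      rw [PySem.Str.len_eq] at hle
      exact_mod_cast hle
    set l := message.toList with hl
    -- A side
    have hA : find_packet_start message (wlN:Int)
        = ((List.range' 0 (l.length - wlN)).find?
            (fun j => decide (pvWin l j (wlN+1)).Nodup)).map (fun j => (j:Int) + wlN + 1) := by
      unfold find_packet_start
      simp only [← hl]
      rw [PySem.List.slice_from l h0, Int.toNat_natCast]
      rw [pvCacheA l wlN hwn wlN le_rfl]
      have := pvLoopA l wlN (l.length - wlN) 0 (by omega)
      simp only [Nat.zero_add, Nat.cast_zero] at this
      rw [show pvWin l 0 wlN = l.take wlN by simp [pvWin]] at this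
      exact this
    -- B side
    have hB : find_packet_start_alt message (wlN:Int)
        = ((List.range' 0 l.length).find?
            (fun e => decide (wlN ≤ e ∧ (pvWin l (e - wlN) (wlN+1)).Nodup))).map
            (fun e => (e:Int) + 1) := by
      unfold find_packet_start_alt
      simp only [← hl]
      have := pvLoopB l wlN l.length 0 0 PySem.Dict.empty (by omega) le_rfl (by omega)
        (by simp [pvWin]) (Or.inl rfl)
        (by
          intro c
          constructor
          · intro j hj
            rw [PySem.Dict.get?_empty] at hj
            simp at hj
          · intro _ t ht
            omega)
      simp only [Nat.cast_zero, List.drop_zero] at this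
      exact this
    rw [hA, hB, pvBridge l wlN hwn]

@[simp] theorem find_packet_start_raises : Claim_raises_find_packet_start := by
  unfold Claim_raises_find_packet_start
  refine ⟨?_, by decide⟩
  intro m wl _ hr hp
  exact absurd hp (by unfold Pre_find_packet_start Raises_find_packet_start at *; omega)
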